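-- pv_equiv track=rewrite | github.com/seanys/2D-Irregular-Packing-Algorithm | gravity_lowest.py | getBottomLeft
-- ===== SOURCE A (Python) =====
-- def getBottomLeft(poly):
--     bl=[] # bottom left的全部点
--     min_y=999999
--     # 采用重心最低的原则
--     for i,pt in enumerate(poly):
--         pt_object={
--                 "index":i,
--                 "x":pt[0],
--                 "y":pt[1]
--         }
--         if pt[1]<min_y:
--             # 如果y更小，那就更新bl
--             min_y=pt[1]
--             bl=[pt_object]
--         elif pt[1]==min_y:
--             # 相同则添加这个点
--             bl.append(pt_object)
--         else:
--             pass
--     if len(bl)==1: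
--         return bl[0]["index"]
--     else:
--         min_x=bl[0]["x"]
--         one_pt=bl[0]
--         for pt_index in range(1,len(bl)):
--             if bl[pt_index]["x"]<min_x:
--                 one_pt=bl[pt_index]
--                 min_x=one_pt["x"]
--         return one_pt["index"]
-- ===== SOURCE B (Python) =====
-- def getBottomLeft(poly):
--     best_i = 0
--     best_x, best_y = poly[0]
--     for i in range(1, len(poly)):
--         x, y = poly[i]
--         if y < best_y or (y == best_y and x < best_x):
--             best_i, best_x, best_y = i, x, y
--     return best_i
-- ===== Notes on version B (the rewrite author's own statement) =====
-- stated objective: simpler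
-- what changed: Replaces A's two-pass structure (collect all min-y points as dicts, then rescan them for min x) with a single lexicographic-minimum pass keeping one running best index/x/y.
-- crash fix: On a nonempty poly whose y-coordinates all exceed A's 999999 sentinel, A raises IndexError (bl stays empty); B returns the index of the lexicographic (y,x)-minimum point. — e.g. on getBottomLeft([(0, 1000000)]): A raises IndexError, B returns 0
import Mathlib
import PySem

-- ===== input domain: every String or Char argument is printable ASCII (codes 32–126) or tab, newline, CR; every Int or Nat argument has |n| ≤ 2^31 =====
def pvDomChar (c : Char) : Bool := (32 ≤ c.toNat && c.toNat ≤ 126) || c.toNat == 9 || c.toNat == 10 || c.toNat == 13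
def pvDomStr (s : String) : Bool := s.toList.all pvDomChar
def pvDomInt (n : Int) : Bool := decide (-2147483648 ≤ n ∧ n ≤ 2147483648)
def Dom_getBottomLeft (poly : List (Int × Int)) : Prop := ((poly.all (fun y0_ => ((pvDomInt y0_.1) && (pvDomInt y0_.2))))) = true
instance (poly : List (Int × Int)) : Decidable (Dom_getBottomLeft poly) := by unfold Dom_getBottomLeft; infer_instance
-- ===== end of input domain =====

-- B keeps one running best (index, x, y) in a single lexicographic-minimum pass instead of
-- A's collect-all-min-y-points-then-rescan-for-min-x two-pass structure. Return value only; no mutation.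

-- ===== PORT A =====
-- pt_object = {"index": i, "x": pt[0], "y": pt[1]}  ported as the triple (index, x, y)
def stepA (s : List (Int × Int × Int) × Int) (p : Int × (Int × Int)) : List (Int × Int × Int) × Int :=
  let pt : Int × Int × Int := (p.1, p.2.1, p.2.2)
  if p.2.2 < s.2 then ([pt], p.2.2)
  else if p.2.2 = s.2 then (s.1 ++ [pt], s.2)
  else s

-- the second loop (scan bl for a strictly smaller x), state = (one_pt, min_x)
def stepX (st : (Int × Int × Int) × Int) (p : Int × Int × Int) : (Int × Int × Int) × Int :=
  if p.2.1 < st.2 then (p, p.2.1) else st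

-- the tail of A after the first loop: len-1 shortcut, else bl[0] + scan (bl=[] is Python's IndexError, excluded by Pre_)
def finishA (s : List (Int × Int × Int) × Int) : Int :=
  if s.1.length == 1 then (s.1.headD (0, 0, 0)).1
  else
    match s.1 with
    | [] => 0  -- Python: bl[0] raises IndexError here; outside Pre_
    | b0 :: rest => ((rest.foldl stepX (b0, b0.2.1)).1).1

def getBottomLeft (poly : List (Int × Int)) : Int :=
  finishA ((PySem.List.enumerate poly).foldl stepA ([], 999999))

-- ===== PORT B =====
def altLoop (l : List (Int × Int)) (i bi bx by_ : Int) : Int :=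
  match l with
  | [] => bi
  | (x, y) :: rest =>
      if y < by_ ∨ (y = by_ ∧ x < bx) then altLoop rest (i + 1) i x y
      else altLoop rest (i + 1) bi bx by_

def getBottomLeft_alt (poly : List (Int × Int)) : Int :=
  match poly with
  | [] => 0  -- Python B: poly[0] raises IndexError; outside Pre_
  | (x, y) :: rest => altLoop rest 1 0 x y

-- ===== PRECONDITION & SPEC =====
-- Pre_ excludes exactly the inputs where A raises IndexError: empty poly, or every y above the 999999 sentinel.
def Pre_getBottomLeft (poly : List (Int × Int)) : Prop := ∃ p ∈ poly, p.2 ≤ 999999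
instance (poly : List (Int × Int)) : Decidable (Pre_getBottomLeft poly) := by unfold Pre_getBottomLeft; infer_instance
def pvWitness_getBottomLeft : (List (Int × Int)) := [(2, 3), (1, 3), (5, -1)]

-- On a nonempty poly whose y-coordinates all exceed 999999, A raises IndexError; B returns the
-- index of the lexicographic (y,x)-minimum point.
def Raises_getBottomLeft (poly : List (Int × Int)) : Prop := poly ≠ [] ∧ ∀ p ∈ poly, 999999 < p.2
instance (poly : List (Int × Int)) : Decidable (Raises_getBottomLeft poly) := by unfold Raises_getBottomLeft; infer_instance
def pvRaiseWitness_getBottomLeft : (List (Int × Int)) := [(0, 1000000)]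
def pvRaiseWitnessOut_getBottomLeft : Int := 0

def Spec_getBottomLeft (poly : List (Int × Int)) (out : Int) : Prop := out = getBottomLeft_alt poly
instance (poly : List (Int × Int)) (out : Int) : Decidable (Spec_getBottomLeft poly out) := by unfold Spec_getBottomLeft; infer_instance

-- ===== CLAIM (what is proved, stated in full; the proofs are below) =====
def Claim_equal_getBottomLeft : Prop := ∀ (poly : List (Int × Int)), Dom_getBottomLeft poly → Pre_getBottomLeft poly → Spec_getBottomLeft poly (getBottomLeft poly)
def Claim_raises_getBottomLeft : Prop := (∀ (poly : List (Int × Int)), Dom_getBottomLeft poly → Raises_getBottomLeft poly → ¬ Pre_getBottomLeft poly) ∧ (Dom_getBottomLeft (pvRaiseWitness_getBottomLeft) ∧ Raises_getBottomLeft (pvRaiseWitness_getBottomLeft) ∧ getBottomLeft_alt (pvRaiseWitness_getBottomLeft) = pvRaiseWitnessOut_getBottomLeft)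

-- ===== LEMMAS AND PROOFS =====

-- first strict-x minimum of a list, seeded with b
def pick2 (b : Int × Int × Int) : List (Int × Int × Int) → Int × Int × Int
  | [] => b
  | p :: l => if p.2.1 < b.2.1 then pick2 p l else pick2 b l

lemma foldl_stepX_eq (rest : List (Int × Int × Int)) :
    ∀ b, rest.foldl stepX (b, b.2.1) = (pick2 b rest, (pick2 b rest).2.1) := by
  induction rest with
  | nil => intro b; simp [pick2]
  | cons p l ih =>
      intro b
      simp only [List.foldl, stepX, pick2]
      split <;> exact ih _

lemma pick2_append (l : List (Int × Int × Int)) :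
    ∀ b p, pick2 b (l ++ [p]) = (if p.2.1 < (pick2 b l).2.1 then p else pick2 b l) := by
  induction l with
  | nil => intro b p; simp [pick2]
  | cons q l ih =>
      intro b p
      simp only [List.cons_append, pick2]
      split <;> exact ih _ _

-- main loop correspondence: once A's bl is nonempty with all y's = m, A's remaining work
-- equals B's remaining work seeded with bl's current first strict-x minimum
lemma loop_eq (l : List (Int × Int)) :
    ∀ (i : Int) (b0 : Int × Int × Int) (rest : List (Int × Int × Int)) (m : Int),
      finishA (List.foldl stepA (b0 :: rest, m) (PySem.List.enumerate l i)) =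
        altLoop l i (pick2 b0 rest).1 (pick2 b0 rest).2.1 m := by
  induction l with
  | nil =>
      intro i b0 rest m
      simp only [PySem.List.enumerate_nil, List.foldl, altLoop, finishA]
      rcases rest with _ | ⟨q, rest'⟩
      · simp [pick2]
      · rw [foldl_stepX_eq]
        simp
  | cons hd tl ih =>
      intro i b0 rest m
      obtain ⟨x, y⟩ := hd
      rw [PySem.List.enumerate_cons]
      simp only [List.foldl, altLoop]
      by_cases h1 : y < m
      · rw [if_pos (Or.inl h1),
            show stepA (b0 :: rest, m) (i, (x, y)) = ([(i, x, y)], y) by simp [stepA, h1],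
            ih]
        simp [pick2]
      · by_cases h2 : y = m
        · subst h2
          rw [show stepA (b0 :: rest, y) (i, (x, y)) = (b0 :: (rest ++ [(i, x, y)]), y) by
                simp [stepA],
              ih, pick2_append]
          by_cases hx : x < (pick2 b0 rest).2.1
          · rw [if_pos hx, if_pos (Or.inr ⟨rfl, hx⟩)]
          · rw [if_neg hx, if_neg (by rintro (h | ⟨_, h⟩); exacts [absurd h (lt_irrefl _), hx h])]
        · rw [show stepA (b0 :: rest, m) (i, (x, y)) = (b0 :: rest, m) by simp [stepA, h1, h2],
              ih, if_neg (by rintro (h | ⟨h, _⟩) <;> [exact h1 h; exact h2 h])]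

-- prefix correspondence: while A's bl is still empty (all seen y's > 999999) and B's best y is > 999999
lemma pre_eq (l : List (Int × Int)) :
    ∀ (i bi bx by0 : Int), 999999 < by0 → (∃ p ∈ l, p.2 ≤ 999999) →
      finishA (List.foldl stepA ([], 999999) (PySem.List.enumerate l i)) =
        altLoop l i bi bx by0 := by
  induction l with
  | nil => intro _ _ _ _ _ h; exact absurd h (by simp)
  | cons hd tl ih =>
      intro i bi bx by0 hby hex
      obtain ⟨x, y⟩ := hd
      rw [PySem.List.enumerate_cons]
      simp only [List.foldl, altLoop]
      by_cases h1 : y < 999999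
      · rw [if_pos (Or.inl (by omega : y < by0)),
            show stepA (([] : List (Int × Int × Int)), 999999) (i, (x, y)) = ([(i, x, y)], y) by
              simp [stepA, h1],
            loop_eq]
        simp [pick2]
      · by_cases h2 : y = 999999
        · subst h2
          rw [if_pos (Or.inl (by omega : (999999 : Int) < by0)),
              show stepA (([] : List (Int × Int × Int)), 999999) (i, (x, 999999)) =
                  ([(i, x, 999999)], 999999) by simp [stepA],
              loop_eq]
          simp [pick2]
        · have h3 : 999999 < y := by omega
          have hex' : ∃ p ∈ tl, p.2 ≤ 999999 := by
            rcases hex with ⟨p, hp, hple⟩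
            rcases List.mem_cons.1 hp with h | h
            · exact absurd hple (by simp [h]; omega)
            · exact ⟨p, h, hple⟩
          rw [show stepA (([] : List (Int × Int × Int)), 999999) (i, (x, y)) =
                (([] : List (Int × Int × Int)), 999999) by simp [stepA, h1, h2]]
          by_cases hu : y < by0 ∨ (y = by0 ∧ x < bx)
          · rw [if_pos hu, ih _ _ _ _ h3 hex']
          · rw [if_neg hu, ih _ _ _ _ hby hex']

-- ===== VERDICT (by name: the statement is the Claim_ definition above) =====
theorem getBottomLeft_spec : Claim_equal_getBottomLeft := by
  intro poly _ hpre
  unfold Spec_getBottomLeft getBottomLeft getBottomLeft_alt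
  rcases poly with _ | ⟨⟨x, y⟩, rest⟩
  · exact absurd hpre (by simp [Pre_getBottomLeft])
  · rw [show PySem.List.enumerate ((x, y) :: rest) = PySem.List.enumerate ((x, y) :: rest) 0 from rfl,
        PySem.List.enumerate_cons]
    simp only [List.foldl]
    by_cases h1 : y < 999999
    · rw [show stepA (([] : List (Int × Int × Int)), 999999) (0, (x, y)) = ([(0, x, y)], y) by
            simp [stepA, h1],
          loop_eq]
      simp [pick2]
    · by_cases h2 : y = 999999
      · subst h2
        rw [show stepA (([] : List (Int × Int × Int)), 999999) (0, (x, 999999)) =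
              ([(0, x, 999999)], 999999) by simp [stepA],
            loop_eq]
        simp [pick2]
      · have h3 : 999999 < y := by omega
        have hex : ∃ p ∈ rest, p.2 ≤ 999999 := by
          rcases hpre with ⟨p, hp, hple⟩
          rcases List.mem_cons.1 hp with h | h
          · exact absurd hple (by simp [h]; omega)
          · exact ⟨p, h, hple⟩
        rw [show stepA (([] : List (Int × Int × Int)), 999999) (0, (x, y)) =
              (([] : List (Int × Int × Int)), 999999) by simp [stepA, h1, h2]]
        exact pre_eq rest 1 0 x y h3 hex

def getBottomLeft_raises : Claim_raises_getBottomLeft := by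
  unfold Claim_raises_getBottomLeft
  refine ⟨?_, by decide⟩
  rintro poly _ ⟨_, hall⟩ ⟨p, hp, hle⟩
  exact absurd (hall p hp) (by omega)
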